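-- pv_equiv track=rewrite | github.com/QamerHassan/Automated-TimeTable-Schedular | backend/main/views.py | get_time_block
-- ===== SOURCE A (Python) =====
-- TIME_BLOCKS = {
--     "morning": ["08:00-09:15", "09:30-10:45", "11:00-12:15"],
--     "early_afternoon": ["12:30-13:45", "14:00-15:15", "15:30-16:45"],
--     "evening": ["17:00-18:15", "18:30-19:45", "20:00-21:15"]
-- }
--
-- LAB_BLOCKS = {
--     "morning": ["08:00-10:30"],
--     "afternoon": ["11:00-13:30", "14:00-16:30"],
--     "evening": ["17:00-19:30"]
-- }
--
-- def get_time_block(time_slot: str, is_lab: bool) -> str: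
--     """NEW: Get the time block for a given time slot"""
--     if is_lab:
--         for block_name, slots in LAB_BLOCKS.items():
--             if time_slot in slots:
--                 return block_name
--     else:
--         for block_name, slots in TIME_BLOCKS.items():
--             if time_slot in slots:
--                 return block_name
--     return "unknown"
-- ===== SOURCE B (Python) =====
-- TIME_BLOCKS = {
--     "morning": ["08:00-09:15", "09:30-10:45", "11:00-12:15"],
--     "early_afternoon": ["12:30-13:45", "14:00-15:15", "15:30-16:45"],
--     "evening": ["17:00-18:15", "18:30-19:45", "20:00-21:15"]
-- }
--
-- LAB_BLOCKS = {
--     "morning": ["08:00-10:30"],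
--     "afternoon": ["11:00-13:30", "14:00-16:30"],
--     "evening": ["17:00-19:30"]
-- }
--
--
-- def _reverse(blocks):
--     rev = {}
--     for name, slots in blocks.items():
--         for slot in slots:
--             rev[slot] = name
--     return rev
--
--
-- _TIME_REV = _reverse(TIME_BLOCKS)
-- _LAB_REV = _reverse(LAB_BLOCKS)
--
--
-- def get_time_block(time_slot: str, is_lab: bool) -> str:
--     rev = _LAB_REV if is_lab else _TIME_REV
--     return rev.get(time_slot, "unknown")
-- ===== Notes on version B (the rewrite author's own statement) =====
-- stated objective: idiomatic
-- what changed: Replaces the per-call scan over block/slot lists with two module-level reverse dictionaries (slot -> block name) built once by a populating loop; the function body is a single dict .get with 'unknown' as default.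
import Mathlib
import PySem

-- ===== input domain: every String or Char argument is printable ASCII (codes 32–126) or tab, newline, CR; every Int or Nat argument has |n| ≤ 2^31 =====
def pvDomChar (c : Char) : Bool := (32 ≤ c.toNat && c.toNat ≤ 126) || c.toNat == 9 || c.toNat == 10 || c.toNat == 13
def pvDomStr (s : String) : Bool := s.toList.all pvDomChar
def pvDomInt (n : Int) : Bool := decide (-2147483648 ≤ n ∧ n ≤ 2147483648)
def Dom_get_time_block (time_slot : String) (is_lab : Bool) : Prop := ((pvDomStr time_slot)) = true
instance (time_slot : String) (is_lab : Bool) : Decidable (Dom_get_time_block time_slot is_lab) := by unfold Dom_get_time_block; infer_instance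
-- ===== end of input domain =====

-- B replaces A's per-call scan over the block tables with reverse slot->name dictionaries
-- built once by a populating loop; the function body is a single dict lookup (idiomatic).

-- ===== PORT A =====
def TIME_BLOCKS : List (String × List String) :=
  [("morning", ["08:00-09:15", "09:30-10:45", "11:00-12:15"]),
   ("early_afternoon", ["12:30-13:45", "14:00-15:15", "15:30-16:45"]),
   ("evening", ["17:00-18:15", "18:30-19:45", "20:00-21:15"])]

def LAB_BLOCKS : List (String × List String) :=
  [("morning", ["08:00-10:30"]),
   ("afternoon", ["11:00-13:30", "14:00-16:30"]),
   ("evening", ["17:00-19:30"])]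

-- the 'for block_name, slots in …: if time_slot in slots: return block_name' loop
def pvLoopA (blocks : List (String × List String)) (time_slot : String) : Option String :=
  match blocks with
  | [] => none
  | (block_name, slots) :: rest =>
      if slots.contains time_slot then some block_name else pvLoopA rest time_slot

def get_time_block (time_slot : String) (is_lab : Bool) : String :=
  if is_lab then
    match pvLoopA LAB_BLOCKS time_slot with
    | some name => name
    | none => "unknown"
  else
    match pvLoopA TIME_BLOCKS time_slot with
    | some name => name
    | none => "unknown"

-- ===== PORT B =====
-- _reverse: populate rev[slot] = name for every name, slots, slot
def pvReverse (blocks : List (String × List String)) : PySem.Dict String String :=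
  blocks.foldl (fun rev p => p.2.foldl (fun rev slot => rev.insert slot p.1) rev) PySem.Dict.empty

def pvTimeRev : PySem.Dict String String := pvReverse TIME_BLOCKS
def pvLabRev : PySem.Dict String String := pvReverse LAB_BLOCKS

def get_time_block_alt (time_slot : String) (is_lab : Bool) : String :=
  (if is_lab then pvLabRev else pvTimeRev).getD time_slot "unknown"

-- ===== PRECONDITION & SPEC =====
def Spec_get_time_block (time_slot : String) (is_lab : Bool) (out : String) : Prop := out = get_time_block_alt time_slot is_lab
instance (time_slot : String) (is_lab : Bool) (out : String) : Decidable (Spec_get_time_block time_slot is_lab out) := by unfold Spec_get_time_block; infer_instance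

-- ===== CLAIM (what is proved, stated in full; the proofs are below) =====
def Claim_equal_get_time_block : Prop := ∀ (time_slot : String) (is_lab : Bool), Dom_get_time_block time_slot is_lab → Spec_get_time_block time_slot is_lab (get_time_block time_slot is_lab)

-- ===== LEMMAS AND PROOFS =====

theorem pvTimeRev_eq : pvTimeRev = PySem.Dict.mk
    [("08:00-09:15", "morning"), ("09:30-10:45", "morning"), ("11:00-12:15", "morning"),
     ("12:30-13:45", "early_afternoon"), ("14:00-15:15", "early_afternoon"), ("15:30-16:45", "early_afternoon"),
     ("17:00-18:15", "evening"), ("18:30-19:45", "evening"), ("20:00-21:15", "evening")] := by decide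

theorem pvLabRev_eq : pvLabRev = PySem.Dict.mk
    [("08:00-10:30", "morning"), ("11:00-13:30", "afternoon"), ("14:00-16:30", "afternoon"),
     ("17:00-19:30", "evening")] := by decide

-- ===== VERDICT (by name: the statement is the Claim_ definition above) =====
set_option maxHeartbeats 2000000 in
theorem get_time_block_spec : Claim_equal_get_time_block := by
  intro ts lab _
  unfold Spec_get_time_block get_time_block get_time_block_alt
  cases lab <;>
    simp only [Bool.false_eq_true, if_false, if_true, TIME_BLOCKS, LAB_BLOCKS,
      pvLoopA, List.contains_cons, List.contains_nil, pvTimeRev_eq, pvLabRev_eq,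
      PySem.Dict.getD, PySem.Dict.get?_mk_cons] <;>
    (split_ifs <;> simp_all [PySem.Dict.get?] <;> first | rfl | (subst_vars; simp_all) | tauto)
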